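-- pv_equiv track=rewrite | github.com/leonardomt/Bit_Map-Python | main.py | define_n_m_values
-- ===== SOURCE A (Python) =====
-- def define_n_m_values(line):
--     count_values = 0
--     n_value = ''
--     m_value = ''
--     for letter in line:
--         if letter.isdigit() and count_values == 0:
--             n_value += letter
--         elif not letter.isdigit():
--             count_values = 1
--         elif letter.isdigit() and count_values == 1:
--             m_value += letter
--     return [n_value, m_value]
-- ===== SOURCE B (Python) =====
-- from itertools import takewhile, dropwhile
--
-- def define_n_m_values(line):
--     n_value = ''.join(takewhile(str.isdigit, line))
--     m_value = ''.join(filter(str.isdigit, dropwhile(str.isdigit, line)))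
--     return [n_value, m_value]
-- ===== Notes on version B (the rewrite author's own statement) =====
-- stated objective: idiomatic
-- what changed: Replaced the running-flag state machine with two itertools passes: n is the leading digit run (takewhile) and m is every digit in the remainder after that run (filter over dropwhile).
import Mathlib
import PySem

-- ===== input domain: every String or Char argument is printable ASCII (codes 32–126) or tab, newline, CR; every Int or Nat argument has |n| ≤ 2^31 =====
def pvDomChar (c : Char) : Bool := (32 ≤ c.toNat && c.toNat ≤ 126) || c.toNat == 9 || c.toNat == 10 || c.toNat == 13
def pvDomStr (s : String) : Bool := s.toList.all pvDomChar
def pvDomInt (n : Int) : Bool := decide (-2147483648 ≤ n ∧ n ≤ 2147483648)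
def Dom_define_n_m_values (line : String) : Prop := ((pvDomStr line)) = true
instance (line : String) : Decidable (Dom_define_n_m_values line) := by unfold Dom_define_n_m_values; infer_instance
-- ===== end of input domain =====

-- B replaces A's running-flag state machine with two passes: the leading digit run, then a digit filter of the remainder (idiomatic; same cost).

-- ===== PORT A =====
-- the loop body of A: state (count_values, n_value, m_value)
def pvStepA (s : Nat × List Char × List Char) (c : Char) : Nat × List Char × List Char :=
  let (count, n, m) := s
  if PySem.Chars.isdigit c && count == 0 then (count, n ++ [c], m)
  else if !PySem.Chars.isdigit c then (1, n, m)
  else if PySem.Chars.isdigit c && count == 1 then (count, n, m ++ [c])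
  else s

def define_n_m_values (line : String) : List String :=
  let st := line.toList.foldl pvStepA (0, [], [])
  [String.mk st.2.1, String.mk st.2.2]

-- ===== PORT B =====
def define_n_m_values_alt (line : String) : List String :=
  let cs := line.toList
  [String.mk (cs.takeWhile PySem.Chars.isdigit),
   String.mk (((cs.dropWhile PySem.Chars.isdigit).filter PySem.Chars.isdigit))]

-- ===== PRECONDITION & SPEC =====
def Spec_define_n_m_values (line : String) (out : List String) : Prop := out = define_n_m_values_alt line
instance (line : String) (out : List String) : Decidable (Spec_define_n_m_values line out) := by unfold Spec_define_n_m_values; infer_instance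

-- ===== CLAIM (what is proved, stated in full; the proofs are below) =====
def Claim_equal_define_n_m_values : Prop := ∀ (line : String), Dom_define_n_m_values line → Spec_define_n_m_values line (define_n_m_values line)

-- ===== LEMMAS AND PROOFS =====
-- once count_values is 1 it stays 1, n is frozen, and m collects exactly the digits
theorem pvLoop1 (cs : List Char) (n m : List Char) :
    cs.foldl pvStepA (1, n, m) = (1, n, m ++ cs.filter PySem.Chars.isdigit) := by
  induction cs generalizing m with
  | nil => simp
  | cons c rest ih =>
    by_cases h : PySem.Chars.isdigit c = true <;>
      simp [pvStepA, h, ih, List.filter_cons]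

-- while count_values is 0, digits extend n; the first non-digit flips to the 1-state
theorem pvLoop0 (cs : List Char) (n : List Char) :
    (cs.foldl pvStepA (0, n, ([] : List Char))).2 =
      (n ++ cs.takeWhile PySem.Chars.isdigit,
       (cs.dropWhile PySem.Chars.isdigit).filter PySem.Chars.isdigit) := by
  induction cs generalizing n with
  | nil => simp
  | cons c rest ih =>
    by_cases h : PySem.Chars.isdigit c = true
    · simp [pvStepA, h, ih]
    · simp [pvStepA, h, pvLoop1]

-- ===== VERDICT (by name: the statement is the Claim_ definition above) =====
theorem define_n_m_values_spec : Claim_equal_define_n_m_values := by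
  intro line _
  unfold Spec_define_n_m_values define_n_m_values define_n_m_values_alt
  have h := pvLoop0 line.toList []
  simp only [List.nil_append] at h
  simp [h]
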